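-- pv_equiv track=rewrite | github.com/jinyoong/baekjoon | 15685 - 드래곤 커브.py | draw_curve
-- ===== SOURCE A (Python) =====
-- def draw_curve(info, k):
--
--     for _ in range(k):
--         lr, lc = info[-1]
--         length = len(info)
--
--         for i in range(length - 2, -1, -1):
--             r, c = info[i]
--             dr, dc = lr - r, lc - c
--             nr, nc = lr + -1 * dc, lc + dr
--
--             info.append([nr, nc])
--
--     return info
-- ===== SOURCE B (Python) =====
-- def draw_curve(info, k):
--     # Direction-sequence formulation: encode the curve as its start point plus the
--     # list of consecutive-point deltas; each iteration appends the reversed,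
--     # 90-degree-rotated delta list; then rebuild the points and refill info.
--     if k > 0:
--         r, c = info[0]
--         deltas = [(b[0] - a[0], b[1] - a[1]) for a, b in zip(info, info[1:])]
--         for _ in range(k):
--             deltas += [(-dc, dr) for dr, dc in reversed(deltas)]
--         pts = [[r, c]]
--         for dr, dc in deltas:
--             r += dr
--             c += dc
--             pts.append([r, c])
--         info[:] = pts
--     return info
-- ===== Notes on version B (the rewrite author's own statement) =====
-- stated objective: alternative
-- what changed: B re-derives the curve from its start point plus its delta (direction) sequence, doubling the delta list (reversed, rotated 90 degrees) per iteration and rebuilding the points in one final walk, instead of A's per-point rotation around the last point inside each iteration; B overwrites info[:] where A appends, with identical final contents.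
import Mathlib
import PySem

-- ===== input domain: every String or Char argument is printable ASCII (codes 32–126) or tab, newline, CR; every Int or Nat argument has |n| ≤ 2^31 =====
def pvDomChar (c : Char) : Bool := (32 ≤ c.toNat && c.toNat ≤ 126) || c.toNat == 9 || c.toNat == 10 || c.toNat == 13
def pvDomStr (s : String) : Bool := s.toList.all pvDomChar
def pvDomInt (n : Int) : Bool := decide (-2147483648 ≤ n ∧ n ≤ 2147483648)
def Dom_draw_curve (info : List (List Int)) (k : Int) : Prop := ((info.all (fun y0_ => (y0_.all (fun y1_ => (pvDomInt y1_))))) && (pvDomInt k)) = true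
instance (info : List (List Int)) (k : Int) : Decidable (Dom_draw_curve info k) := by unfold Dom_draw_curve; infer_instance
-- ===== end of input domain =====

-- B re-derives the curve from its start point and delta (direction) sequence, doubling the
-- delta list per iteration, instead of A's per-point rotation around the last point (objective:
-- alternative; same asymptotic cost). Return-value equivalence only: A appends to `info` in
-- place, B overwrites `info[:]` — the final list contents coincide.

-- ===== PORT A =====
-- body of A's outer `for _ in range(k)` loop; `lr, lc = info[-1]` and `r, c = info[i]`
-- are ported with `getD` defaults, exact whenever the unpacking succeeds (ensured by Pre_)
def drawIter (cur : List (List Int)) : List (List Int) :=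
  let last := (PySem.List.pyGet? cur (-1)).getD []
  let lr := last.getD 0 0
  let lc := last.getD 1 0
  let length : Int := (cur.length : Int)
  (PySem.List.pyRange (length - 2) (-1) (-1)).foldl
    (fun acc i =>
      let row := (PySem.List.pyGet? acc i).getD []
      let r := row.getD 0 0
      let c := row.getD 1 0
      let dr := lr - r
      let dc := lc - c
      acc ++ [[lr + -1 * dc, lc + dr]]) cur

def draw_curve (info : List (List Int)) (k : Int) : List (List Int) :=
  (List.range k.toNat).foldl (fun cur _ => drawIter cur) info

-- ===== PORT B =====
-- `(-dc, dr) for dr, dc in reversed(deltas)`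
def rotB (d : Int × Int) : Int × Int := (-d.2, d.1)

-- the zip comprehension building the consecutive-point deltas
def deltasOf (info : List (List Int)) : List (Int × Int) :=
  (info.zip info.tail).map
    (fun ab => (ab.2.getD 0 0 - ab.1.getD 0 0, ab.2.getD 1 0 - ab.1.getD 1 0))

-- body of B's point-rebuilding loop (state: current point, accumulated pts)
def buildStep (st : (Int × Int) × List (List Int)) (d : Int × Int) :
    (Int × Int) × List (List Int) :=
  ((st.1.1 + d.1, st.1.2 + d.2), st.2 ++ [[st.1.1 + d.1, st.1.2 + d.2]])

def draw_curve_alt (info : List (List Int)) (k : Int) : List (List Int) :=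
  if 0 < k then
    let hd := info.headD []
    let r0 := hd.getD 0 0
    let c0 := hd.getD 1 0
    let deltas := (List.range k.toNat).foldl (fun ds _ => ds ++ ds.reverse.map rotB) (deltasOf info)
    (deltas.foldl buildStep ((r0, c0), [[r0, c0]])).2
  else info

-- ===== PRECONDITION & SPEC =====
-- Pre_ excludes exactly the inputs where the Python A raises: with k ≥ 1 it does
-- `lr, lc = info[-1]` (IndexError on empty info) and unpacks every row into two
-- variables (ValueError unless every row has length 2); with k ≤ 0 A is total.
def Pre_draw_curve (info : List (List Int)) (k : Int) : Prop :=
  k ≤ 0 ∨ (info ≠ [] ∧ ∀ row ∈ info, row.length = 2)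
instance (info : List (List Int)) (k : Int) : Decidable (Pre_draw_curve info k) := by
  unfold Pre_draw_curve; infer_instance

def pvWitness_draw_curve : List (List Int) × Int := ([[0, 0], [0, 1]], 2)

def Spec_draw_curve (info : List (List Int)) (k : Int) (out : List (List Int)) : Prop := out = draw_curve_alt info k
instance (info : List (List Int)) (k : Int) (out : List (List Int)) : Decidable (Spec_draw_curve info k out) := by unfold Spec_draw_curve; infer_instance

-- ===== CLAIM (what is proved, stated in full; the proofs are below) =====
def Claim_equal_draw_curve : Prop := ∀ (info : List (List Int)) (k : Int), Dom_draw_curve info k → Pre_draw_curve info k → Spec_draw_curve info k (draw_curve info k)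

-- ===== LEMMAS AND PROOFS =====

def vadd (p d : Int × Int) : Int × Int := (p.1 + d.1, p.2 + d.2)

def tailPts : Int × Int → List (Int × Int) → List (List Int)
  | _, [] => []
  | p, d :: ds => [p.1 + d.1, p.2 + d.2] :: tailPts (vadd p d) ds

def ptsFrom (p : Int × Int) (ds : List (Int × Int)) : List (List Int) :=
  [p.1, p.2] :: tailPts p ds

def endPt : Int × Int → List (Int × Int) → Int × Int
  | p, [] => p
  | p, d :: ds => endPt (vadd p d) ds

-- the point A appends for source row `row`, pivot e
def gfun (e : Int × Int) (row : List Int) : List Int :=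
  [e.1 + -1 * (e.2 - row.getD 1 0), e.2 + (e.1 - row.getD 0 0)]

theorem ptsFrom_cons (p d : Int × Int) (ds : List (Int × Int)) :
    ptsFrom p (d :: ds) = [p.1, p.2] :: ptsFrom (vadd p d) ds := by
  simp [ptsFrom, tailPts, vadd]

theorem tailPts_append (as : List (Int × Int)) (p : Int × Int) (bs : List (Int × Int)) :
    tailPts p (as ++ bs) = tailPts p as ++ tailPts (endPt p as) bs := by
  induction as generalizing p with
  | nil => simp [tailPts, endPt]
  | cons d as ih => simp [tailPts, endPt, ih]

theorem ptsFrom_append (p : Int × Int) (as bs : List (Int × Int)) :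
    ptsFrom p (as ++ bs) = ptsFrom p as ++ tailPts (endPt p as) bs := by
  simp [ptsFrom, tailPts_append]

theorem endPt_fst (p : Int × Int) (ds : List (Int × Int)) :
    (endPt p ds).1 = p.1 + (ds.map Prod.fst).sum := by
  induction ds generalizing p with
  | nil => simp [endPt]
  | cons d ds ih => simp [endPt, ih, vadd]; ring

theorem endPt_snd (p : Int × Int) (ds : List (Int × Int)) :
    (endPt p ds).2 = p.2 + (ds.map Prod.snd).sum := by
  induction ds generalizing p with
  | nil => simp [endPt]
  | cons d ds ih => simp [endPt, ih, vadd]; ring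

theorem length_tailPts (p : Int × Int) (ds : List (Int × Int)) :
    (tailPts p ds).length = ds.length := by
  induction ds generalizing p with
  | nil => rfl
  | cons d ds ih => simp [tailPts, ih]

theorem getLast?_ptsFrom (p : Int × Int) (ds : List (Int × Int)) :
    (ptsFrom p ds).getLast? = some [(endPt p ds).1, (endPt p ds).2] := by
  induction ds generalizing p with
  | nil => rfl
  | cons d ds ih =>
      rw [ptsFrom_cons]
      show ([p.1, p.2] :: [(vadd p d).1, (vadd p d).2] :: tailPts (vadd p d) ds).getLast? = _
      rw [List.getLast?_cons_cons]
      exact ih (vadd p d)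


theorem sum_map_neg_snd_aux (ds : List (Int × Int)) :
    (ds.map (fun x => -x.2)).sum = -((ds.map Prod.snd).sum) := by
  induction ds with
  | nil => simp
  | cons a l ih => simp [ih]; ring

-- key identity: the rotated-reversed delta tail is A's rotated-reversed point list
theorem tailPts_rot (ds : List (Int × Int)) (p : Int × Int) :
    tailPts (endPt p ds) (ds.reverse.map rotB)
      = ((ptsFrom p ds).dropLast.reverse).map (gfun (endPt p ds)) := by
  induction ds generalizing p with
  | nil => simp [tailPts, ptsFrom, endPt]
  | cons d ds ih =>
      have hend : endPt p (d :: ds) = endPt (vadd p d) ds := rfl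
      rw [ptsFrom_cons, hend]
      rw [List.dropLast_cons_of_ne_nil (by simp [ptsFrom])]
      rw [List.reverse_cons, List.map_append]
      rw [List.reverse_cons, List.map_append, tailPts_append, ih (vadd p d)]
      congr 1
      -- remaining singleton: both are the single point A appends for the head row
      simp only [List.map_cons, List.map_nil, tailPts, gfun, rotB]
      have E1 : (endPt (endPt (vadd p d) ds) (ds.reverse.map rotB)).1
          = (endPt (vadd p d) ds).1 - (ds.map Prod.snd).sum := by
        rw [endPt_fst, List.map_map]
        have hs : (ds.reverse.map (Prod.fst ∘ rotB)).sum = -((ds.map Prod.snd).sum) := by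
          rw [List.map_reverse, List.sum_reverse]
          simp only [Function.comp_def, rotB]
          exact sum_map_neg_snd_aux ds
        rw [hs]; ring
      have E2 : (endPt (endPt (vadd p d) ds) (ds.reverse.map rotB)).2
          = (endPt (vadd p d) ds).2 + (ds.map Prod.fst).sum := by
        rw [endPt_snd, List.map_map]
        have hs : (ds.reverse.map (Prod.snd ∘ rotB)).sum = (ds.map Prod.fst).sum := by
          rw [List.map_reverse, List.sum_reverse]
          simp only [Function.comp_def, rotB]
        rw [hs]
      have f1 := endPt_fst (vadd p d) ds
      have f2 := endPt_snd (vadd p d) ds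
      simp only [List.getD_cons_succ, List.getD_cons_zero, vadd] at *
      rw [E1, E2, f1, f2]
      simp only [List.cons.injEq, and_true]
      constructor <;> ring

-- the inner fold of A appends, reading only the original prefix
theorem foldA (f : List Int → List Int) (js : List Int) (xs extra : List (List Int))
    (h : ∀ j ∈ js, 0 ≤ j ∧ j < (xs.length : Int)) :
    js.foldl (fun acc i => acc ++ [f ((PySem.List.pyGet? acc i).getD [])]) (xs ++ extra)
      = xs ++ extra ++ js.map (fun j => f ((PySem.List.pyGet? xs j).getD [])) := by
  induction js generalizing extra with
  | nil => simp
  | cons j js ih =>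
      have hj := h j (by simp)
      have hget : PySem.List.pyGet? (xs ++ extra) j = PySem.List.pyGet? xs j := by
        rw [PySem.List.pyGet?_of_nonneg _ hj.1, PySem.List.pyGet?_of_nonneg _ hj.1]
        rw [List.getElem?_append_left]
        omega
      simp only [List.foldl_cons, hget]
      rw [List.append_assoc]
      rw [ih (extra ++ [f ((PySem.List.pyGet? xs j).getD [])])
        (fun a ha => h a (by simp [ha]))]
      simp

theorem map_idx_rev (f : List Int → List Int) (xs : List (List Int)) :
    (List.range (xs.length - 1)).map
        (fun (m : Nat) => f ((PySem.List.pyGet? xs ((xs.length : Int) - 2 - (m : Int))).getD []))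
      = (xs.dropLast.reverse).map f := by
  apply List.ext_getElem
  · simp
  · intro n h1 h2
    have hn : n < xs.length - 1 := by simpa using h1
    rw [List.getElem_map, List.getElem_range, List.getElem_map, List.getElem_reverse,
      List.getElem_dropLast]
    have hidx : (xs.length : Int) - 2 - (n : Int) = ((xs.length - 2 - n : Nat) : Int) := by omega
    rw [hidx, PySem.List.pyGet?_natCast]
    have hlt : xs.length - 2 - n < xs.length := by omega
    rw [List.getElem?_eq_getElem hlt, Option.getD_some]
    have hsame : xs.length - 1 - 1 - n = xs.length - 2 - n := by omega
    simp only [List.length_dropLast, hsame]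

theorem stepA (p : Int × Int) (ds : List (Int × Int)) :
    drawIter (ptsFrom p ds) = ptsFrom p (ds ++ ds.reverse.map rotB) := by
  unfold drawIter
  rw [ptsFrom_append]
  rw [tailPts_rot]
  have hlast : (PySem.List.pyGet? (ptsFrom p ds) (-1)).getD []
      = [(endPt p ds).1, (endPt p ds).2] := by
    rw [PySem.List.pyGet?_neg_one, getLast?_ptsFrom]
    rfl
  simp only [hlast]
  have hlen : ((ptsFrom p ds).length : Int) = (ds.length : Int) + 1 := by
    simp [ptsFrom, length_tailPts]
  rw [hlen]
  have hrange : PySem.List.pyRange ((ds.length : Int) + 1 - 2) (-1) (-1)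
      = (List.range ((ptsFrom p ds).length - 1)).map
          (fun (m : Nat) => (((ptsFrom p ds).length : Int) - 2 - (m : Int))) := by
    rw [PySem.List.pyRange_neg_one]
    have h1 : (((ds.length : Int) + 1 - 2) - (-1)).toNat = (ptsFrom p ds).length - 1 := by
      simp [ptsFrom, length_tailPts]; omega
    rw [h1]
    apply List.map_congr_left
    intro m hm
    have hl : (ptsFrom p ds).length = ds.length + 1 := by simp [ptsFrom, length_tailPts]
    rw [hl]
    push_cast
    ring
  rw [hrange]
  simp only [List.getD_cons_zero, List.getD_cons_succ]
  have hfun : (fun (acc : List (List Int)) (i : Int) =>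
        acc ++ [[(endPt p ds).1 + -1 * ((endPt p ds).2 - ((PySem.List.pyGet? acc i).getD []).getD 1 0),
                 (endPt p ds).2 + ((endPt p ds).1 - ((PySem.List.pyGet? acc i).getD []).getD 0 0)]])
      = (fun acc i => acc ++ [gfun (endPt p ds) ((PySem.List.pyGet? acc i).getD [])]) := by
    funext acc i
    simp [gfun]
  rw [hfun]
  have hx : ptsFrom p ds = ptsFrom p ds ++ ([] : List (List Int)) := by simp
  conv_lhs => rw [hx]
  rw [foldA (gfun (endPt p ds)) _ (ptsFrom p ds) []
    (by
      intro j hj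
      simp only [List.mem_map, List.mem_range] at hj
      obtain ⟨m, hm, rfl⟩ := hj
      constructor <;> simp [ptsFrom, length_tailPts] at hm ⊢ <;> omega)]
  rw [List.map_map]
  simp only [Function.comp_def, List.append_nil]
  rw [map_idx_rev]

theorem foldB (ds : List (Int × Int)) (p : Int × Int) (pre : List (List Int)) :
    (ds.foldl buildStep (p, pre)).2 = pre ++ tailPts p ds := by
  induction ds generalizing p pre with
  | nil => simp [tailPts]
  | cons d ds ih =>
      simp only [List.foldl_cons, buildStep, tailPts]
      rw [ih]
      simp [vadd]

theorem row_two (a : List Int) (h : a.length = 2) : a = [a.getD 0 0, a.getD 1 0] := by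
  match a, h with
  | [x, y], _ => rfl

theorem repr_ptsFrom (info : List (List Int)) (h0 : info ≠ [])
    (h2 : ∀ row ∈ info, row.length = 2) :
    info = ptsFrom ((info.headD []).getD 0 0, (info.headD []).getD 1 0) (deltasOf info) := by
  induction info with
  | nil => exact absurd rfl h0
  | cons a rest ih =>
      match rest with
      | [] =>
          have := row_two a (h2 a (by simp))
          simp [deltasOf, ptsFrom, tailPts]
          exact this
      | b :: rest' =>
          have hb : deltasOf (a :: b :: rest')
              = (b.getD 0 0 - a.getD 0 0, b.getD 1 0 - a.getD 1 0) :: deltasOf (b :: rest') := by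
            simp [deltasOf]
          rw [hb, ptsFrom_cons]
          have hv : vadd (a.getD 0 0, a.getD 1 0)
              (b.getD 0 0 - a.getD 0 0, b.getD 1 0 - a.getD 1 0)
              = ((b :: rest').headD [] |>.getD 0 0, (b :: rest').headD [] |>.getD 1 0) := by
            simp [vadd]
          have ha := row_two a (h2 a (by simp))
          have hrest := ih (by simp) (fun r hr => h2 r (by simp [hr]))
          simp only [List.headD_cons] at hv hrest ⊢
          rw [hv]
          exact List.cons_eq_cons.mpr ⟨by rw [← ha], by rw [← hrest]⟩

theorem main_iter (n : Nat) (p : Int × Int) (ds : List (Int × Int)) :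
    (List.range n).foldl (fun cur _ => drawIter cur) (ptsFrom p ds)
      = ptsFrom p ((List.range n).foldl (fun es _ => es ++ es.reverse.map rotB) ds) := by
  induction n with
  | zero => simp
  | succ m ih =>
      rw [List.range_succ, List.foldl_append, List.foldl_append, ih]
      simp [stepA]

-- ===== VERDICT (by name: the statement is the Claim_ definition above) =====
theorem draw_curve_spec : Claim_equal_draw_curve := by
  intro info k _ hpre
  unfold Spec_draw_curve draw_curve draw_curve_alt
  by_cases hk : 0 < k
  · have h0 : info ≠ [] := by
      rcases hpre with h | h
      · omega
      · exact h.1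
    have h2 : ∀ row ∈ info, row.length = 2 := by
      rcases hpre with h | h
      · omega
      · exact h.2
    rw [if_pos hk]
    simp only
    rw [foldB]
    conv_lhs => rw [repr_ptsFrom info h0 h2]
    rw [main_iter]
    rfl
  · rw [if_neg hk]
    have : k.toNat = 0 := by omega
    rw [this]
    simp
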